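-- pv_equiv track=rewrite | github.com/alexognyanov1/TU | VP/Lab/2024.10.29/task1.py | organize_movies_by_rating
-- ===== SOURCE A (Python) =====
-- def organize_movies_by_rating(movies):
--     movie_dict = {}
--
--     for movie, rating in movies:
--         if rating not in movie_dict:
--             movie_dict[rating] = []
--
--         movie_dict[rating].append(movie)
--
--     sorted_movie_dict = {rating: sorted(
--         movie_dict[rating]) for rating in sorted(movie_dict)}
--
--     return sorted_movie_dict
-- ===== SOURCE B (Python) =====
-- def organize_movies_by_rating(movies):
--     rest = sorted(movies, key=lambda m: m[1])
--     result = {}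
--     while rest:
--         rating = rest[0][1]
--         k = 0
--         while k < len(rest) and rest[k][1] == rating:
--             k += 1
--         result[rating] = sorted(m[0] for m in rest[:k])
--         rest = rest[k:]
--     return result
-- ===== Notes on version B (the rewrite author's own statement) =====
-- stated objective: alternative
-- what changed: Replaces A's hash-dict grouping plus per-key re-lookup and key sort with a single stable sort by rating followed by one consecutive-run grouping pass over the sorted list.
import Mathlib
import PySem

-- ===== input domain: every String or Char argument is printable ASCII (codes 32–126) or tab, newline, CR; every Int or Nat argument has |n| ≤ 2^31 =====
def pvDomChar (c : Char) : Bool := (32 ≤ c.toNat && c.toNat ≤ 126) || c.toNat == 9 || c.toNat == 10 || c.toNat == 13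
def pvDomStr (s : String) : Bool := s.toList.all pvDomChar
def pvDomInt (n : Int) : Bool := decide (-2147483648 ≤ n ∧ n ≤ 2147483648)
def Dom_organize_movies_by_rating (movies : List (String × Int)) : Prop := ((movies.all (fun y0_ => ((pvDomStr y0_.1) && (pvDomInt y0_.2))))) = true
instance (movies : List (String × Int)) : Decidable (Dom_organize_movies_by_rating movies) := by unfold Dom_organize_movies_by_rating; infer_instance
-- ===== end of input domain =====

-- B replaces A's dict-based grouping (then sorting keys and each group) by one stable
-- sort by rating followed by a single consecutive-run grouping pass: an alternative
-- algorithm of similar cost, proved to return the same association list.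


-- ===== PORT A =====
def organize_movies_by_rating (movies : List (String × Int)) : List (Int × List String) :=
  -- for movie, rating in movies: if rating not in movie_dict: movie_dict[rating] = []; movie_dict[rating].append(movie)
  let movie_dict : PySem.Dict Int (List String) :=
    movies.foldl (fun d mr =>
      let d := if d.contains mr.2 then d else d.insert mr.2 []
      d.modify mr.2 [] (fun l => l ++ [mr.1])) PySem.Dict.empty
  -- {rating: sorted(movie_dict[rating]) for rating in sorted(movie_dict)}
  let sorted_movie_dict : PySem.Dict Int (List String) :=
    (PySem.List.sorted movie_dict.keys (fun r => r) false).foldl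
      (fun d r => d.insert r (PySem.List.sorted (movie_dict.getD r []) (fun x => x) false))
      PySem.Dict.empty
  sorted_movie_dict.items

-- ===== PORT B =====
-- the two inner while loops of Source B: take the leading run of equal ratings (rest[:k]),
-- emit (rating, sorted titles of the run), recurse on rest[k:]
def pvGroupRuns (rest : List (String × Int)) : List (Int × List String) :=
  match rest with
  | [] => []
  | m :: t =>
    (m.2, PySem.List.sorted (((m :: t).takeWhile (fun x => x.2 == m.2)).map (fun x => x.1)) (fun x => x) false)
      :: pvGroupRuns ((m :: t).dropWhile (fun x => x.2 == m.2))
termination_by rest.length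
decreasing_by
  simp only [List.dropWhile_cons, beq_self_eq_true, if_true]
  exact Nat.lt_succ_of_le (List.length_dropWhile_le _ _)

def organize_movies_by_rating_alt (movies : List (String × Int)) : List (Int × List String) :=
  -- result = {}; per run: result[rating] = sorted(titles)
  ((pvGroupRuns (PySem.List.sorted movies (fun m => m.2) false)).foldl
      (fun d p => d.insert p.1 p.2) PySem.Dict.empty).items

-- ===== PRECONDITION & SPEC =====
def Spec_organize_movies_by_rating (movies : List (String × Int)) (out : List (Int × List String)) : Prop := out = organize_movies_by_rating_alt movies
instance (movies : List (String × Int)) (out : List (Int × List String)) : Decidable (Spec_organize_movies_by_rating movies out) := by unfold Spec_organize_movies_by_rating; infer_instance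

-- ===== CLAIM (what is proved, stated in full; the proofs are below) =====
def Claim_equal_organize_movies_by_rating : Prop := ∀ (movies : List (String × Int)), Dom_organize_movies_by_rating movies → Spec_organize_movies_by_rating movies (organize_movies_by_rating movies)

-- ===== LEMMAS AND PROOFS =====



-- Set.add / ofList helper lemmas
theorem pvAdd_cons_ne (a y : Int) (acc : List Int) (h : y ≠ a) :
    PySem.Set.add (a :: acc) y = a :: PySem.Set.add acc y := by
  simp [PySem.Set.add, PySem.Set.contains, h]
  split_ifs <;> simp_all

theorem pvFoldlAdd_cons_notmem (ys : List Int) : ∀ (acc : List Int) (a : Int), a ∉ ys →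
    ys.foldl PySem.Set.add (a :: acc) = a :: ys.foldl PySem.Set.add acc := by
  induction ys with
  | nil => intro acc a _; rfl
  | cons y ys ih =>
    intro acc a h
    simp only [List.foldl_cons]
    rw [pvAdd_cons_ne a y acc (by simp at h; tauto)]
    exact ih _ a (by simp at h; tauto)

theorem pvAdd_self (acc : List Int) (a : Int) :
    PySem.Set.add (PySem.Set.add acc a) a = PySem.Set.add acc a := by
  simp [PySem.Set.add, PySem.Set.contains]
  split_ifs <;> simp_all

theorem pvFoldlAdd_const (xs : List Int) : ∀ (acc : List Int) (a : Int), (∀ x ∈ xs, x = a) →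
    xs.foldl PySem.Set.add (PySem.Set.add acc a) = PySem.Set.add acc a := by
  induction xs with
  | nil => intro acc a _; rfl
  | cons x xs ih =>
    intro acc a h
    have hx : x = a := h x (by simp)
    subst hx
    simp only [List.foldl_cons, pvAdd_self]
    exact ih acc x (fun y hy => h y (by simp [hy]))

theorem pvFoldlAdd_sublist (xs : List Int) : ∀ (acc ys : List Int), acc.Sublist ys →
    (xs.foldl PySem.Set.add acc).Sublist (ys ++ xs) := by
  induction xs with
  | nil => intro acc ys h; simpa using h
  | cons x xs ih =>
    intro acc ys h
    simp only [List.foldl_cons]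
    have h2 : (PySem.Set.add acc x).Sublist (ys ++ [x]) := by
      simp only [PySem.Set.add, PySem.Set.contains]
      split_ifs with hc
      · exact h.trans (List.sublist_append_left ys [x])
      · exact List.Sublist.append h (List.Sublist.refl [x])
    have := ih (PySem.Set.add acc x) (ys ++ [x]) h2
    simpa using this

theorem pvOfList_sublist (xs : List Int) : (PySem.Set.ofList xs).Sublist xs := by
  have := pvFoldlAdd_sublist xs [] [] (List.Sublist.refl [])
  simpa [PySem.Set.ofList] using this

theorem pvOfList_run_cons (a : Int) (xs ys : List Int) (hx : ∀ x ∈ xs, x = a) (hy : a ∉ ys) :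
    PySem.Set.ofList (a :: (xs ++ ys)) = a :: PySem.Set.ofList ys := by
  have hempty : (PySem.Set.empty : List Int) = [] := rfl
  simp only [PySem.Set.ofList, List.foldl_cons, List.foldl_append, hempty]
  rw [pvFoldlAdd_const xs [] a hx]
  have h0 : PySem.Set.add ([] : List Int) a = [a] := rfl
  rw [h0]
  exact pvFoldlAdd_cons_notmem ys [] a hy

theorem pvGroupRuns_eq (s : List (String × Int)) (hp : s.Pairwise (fun a b => a.2 ≤ b.2)) :
    pvGroupRuns s = (PySem.Set.ofList (s.map (fun m => m.2))).map
      (fun r => (r, PySem.List.sorted ((s.filter (fun m => m.2 == r)).map (fun x => x.1)) (fun x => x) false)) := by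
  induction s using pvGroupRuns.induct with
  | case1 => simp [pvGroupRuns, PySem.Set.ofList]
  | case2 m t ih =>
    have hTW : (m :: t).takeWhile (fun x => x.2 == m.2) = m :: t.takeWhile (fun x => x.2 == m.2) := by
      simp
    have hDW : (m :: t).dropWhile (fun x => x.2 == m.2) = t.dropWhile (fun x => x.2 == m.2) := by
      simp
    have hsplit : (t.takeWhile (fun x => x.2 == m.2)) ++ (t.dropWhile (fun x => x.2 == m.2)) = t :=
      List.takeWhile_append_dropWhile
    have htake_all : ∀ x ∈ t.takeWhile (fun x => x.2 == m.2), x.2 = m.2 := by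
      intro x hx
      have := List.mem_takeWhile_imp hx
      simpa using this
    have hpc := List.pairwise_cons.mp hp
    have hmt : ∀ y ∈ t, m.2 ≤ y.2 := hpc.1
    have hprest : (t.dropWhile (fun x => x.2 == m.2)).Pairwise (fun a b => a.2 ≤ b.2) :=
      List.Pairwise.sublist (List.dropWhile_sublist _) hpc.2
    have hrest_gt : ∀ y ∈ t.dropWhile (fun x => x.2 == m.2), m.2 < y.2 := by
      intro y hy
      obtain ⟨h0, r', hxr⟩ := List.exists_cons_of_ne_nil (List.ne_nil_of_mem hy)
      have hh0 : ¬ ((fun x : String × Int => x.2 == m.2) h0 = true) := by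
        have := List.head?_dropWhile_not (fun x : String × Int => x.2 == m.2) t
        rw [hxr] at this
        simpa using this
      have hne : h0.2 ≠ m.2 := by simpa using hh0
      have hmem0 : h0 ∈ t := (List.dropWhile_sublist _).mem (by rw [hxr]; simp)
      have hlt : m.2 < h0.2 := lt_of_le_of_ne (hmt h0 hmem0) (Ne.symm hne)
      rw [hxr, List.mem_cons] at hy
      rcases hy with hy | hy
      · rw [hy]; exact hlt
      · exact lt_of_lt_of_le hlt ((List.pairwise_cons.mp (hxr ▸ hprest)).1 y hy)
    have hfilter_t : t.filter (fun x => x.2 == m.2) = t.takeWhile (fun x => x.2 == m.2) := by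
      conv_lhs => rw [← hsplit]
      rw [List.filter_append]
      rw [List.filter_eq_self.mpr (fun x hx => by simp [htake_all x hx])]
      rw [List.filter_eq_nil_iff.mpr (fun y hy => by simp; exact ne_of_gt (hrest_gt y hy))]
      simp
    have hkeys : PySem.Set.ofList ((m :: t).map (fun x => x.2))
        = m.2 :: PySem.Set.ofList ((t.dropWhile (fun x => x.2 == m.2)).map (fun x => x.2)) := by
      have hmap : (m :: t).map (fun x : String × Int => x.2)
          = m.2 :: ((t.takeWhile (fun x => x.2 == m.2)).map (fun x => x.2)
              ++ (t.dropWhile (fun x => x.2 == m.2)).map (fun x => x.2)) := by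
        rw [List.map_cons, ← List.map_append, hsplit]
      rw [hmap]
      apply pvOfList_run_cons
      · intro x hx
        simp only [List.mem_map] at hx
        obtain ⟨y, hy, hxy⟩ := hx
        rw [← hxy]; exact htake_all y hy
      · intro hmem
        simp only [List.mem_map] at hmem
        obtain ⟨y, hy, hxy⟩ := hmem
        exact absurd hxy (ne_of_lt (hrest_gt y hy)).symm
    have hfilter_rest : ∀ r ∈ PySem.Set.ofList ((t.dropWhile (fun x => x.2 == m.2)).map (fun x => x.2)),
        (m :: t).filter (fun x => x.2 == r) = (t.dropWhile (fun x => x.2 == m.2)).filter (fun x => x.2 == r) := by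
      intro r hr
      have hrgt : m.2 < r := by
        rw [PySem.Set.mem_ofList] at hr
        simp only [List.mem_map] at hr
        obtain ⟨y, hy, hxy⟩ := hr
        rw [← hxy]; exact hrest_gt y hy
      rw [List.filter_cons]
      rw [if_neg (by simp; exact ne_of_lt hrgt)]
      conv_lhs => rw [← hsplit]
      rw [List.filter_append]
      rw [List.filter_eq_nil_iff.mpr (fun x hx => by
        simp; rw [htake_all x hx]; exact ne_of_lt hrgt)]
      simp
    rw [pvGroupRuns, hTW, hDW]
    rw [hkeys, List.map_cons]
    congr 1
    · show (m.2, PySem.List.sorted ((m :: t.takeWhile (fun x => x.2 == m.2)).map (fun x => x.1)) (fun x => x) false)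
        = (m.2, PySem.List.sorted (((m :: t).filter (fun m' => m'.2 == m.2)).map (fun x => x.1)) (fun x => x) false)
      rw [List.filter_cons, if_pos (by simp), hfilter_t]
    · have ih' := ih (by rw [hDW]; exact hprest)
      rw [hDW] at ih'
      rw [ih']
      exact (List.map_congr_left (fun r hr => by rw [hfilter_rest r hr])).symm

theorem pvStepA (d : PySem.Dict Int (List String)) (mr : String × Int) :
    (if d.contains mr.2 then d else d.insert mr.2 []).modify mr.2 [] (fun l => l ++ [mr.1])
      = d.modify mr.2 [] (fun l => l ++ [mr.1]) := by
  by_cases hc : d.contains mr.2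
  · rw [if_pos hc]
  · rw [if_neg hc]
    simp only [PySem.Dict.modify]
    rw [PySem.Dict.insert_insert_self]
    rw [PySem.Dict.getD_insert_self]
    rw [PySem.Dict.getD_of_not_contains d [] (by simpa using hc)]

theorem pvMovieDict (movies : List (String × Int)) :
    movies.foldl (fun d mr =>
        (if d.contains mr.2 then d else d.insert mr.2 []).modify mr.2 [] (fun l => l ++ [mr.1]))
      PySem.Dict.empty
    = movies.foldl (fun d mr => d.modify mr.2 [] (fun l => l ++ [mr.1])) PySem.Dict.empty := by
  congr 1
  funext d mr
  exact pvStepA d mr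

theorem pvGetD (movies : List (String × Int)) (r : Int) :
    (movies.foldl (fun d mr => d.modify mr.2 [] (fun l => l ++ [mr.1])) PySem.Dict.empty).getD r []
      = (movies.filter (fun m => m.2 == r)).map (fun x => x.1) := by
  have h : movies.foldl (fun d mr => d.modify mr.2 [] (fun l => l ++ [mr.1])) PySem.Dict.empty
      = (movies.map (fun m => (m.2, m.1))).foldl
          (fun d p => d.modify p.1 [] (fun l => l ++ [p.2])) PySem.Dict.empty := by
    rw [List.foldl_map]
  rw [h, PySem.Dict.getD_foldl_modify_append]
  simp [List.filter_map, List.map_map, Function.comp_def]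

theorem pvKeys (movies : List (String × Int)) :
    (movies.foldl (fun d mr => d.modify mr.2 [] (fun l => l ++ [mr.1])) PySem.Dict.empty).keys
      = PySem.Set.ofList (movies.map (fun m => m.2)) := by
  have h := PySem.Dict.keys_foldl_modify_key movies (fun mr : String × Int => mr.2) []
    (fun _ mr => fun l => l ++ [mr.1]) PySem.Dict.empty
  simpa [PySem.Set.update, PySem.Set.ofList] using h

theorem pvMain (movies : List (String × Int)) :
    organize_movies_by_rating movies = organize_movies_by_rating_alt movies := by
  simp only [organize_movies_by_rating, organize_movies_by_rating_alt]
  rw [pvMovieDict, pvKeys]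
  have hsp : (PySem.List.sorted movies (fun m => m.2) false).Pairwise (fun a b => a.2 ≤ b.2) :=
    PySem.List.sorted_pairwise movies (fun m => m.2)
  have hruns := pvGroupRuns_eq (PySem.List.sorted movies (fun m => m.2) false) hsp
  have hKs_nodup : (PySem.Set.ofList ((PySem.List.sorted movies (fun m => m.2) false).map (fun m => m.2))).Nodup :=
    PySem.Set.nodup_ofList _
  -- A's second loop: fresh distinct keys appended
  have hK0_nodup : (PySem.List.sorted (PySem.Set.ofList (movies.map (fun m => m.2))) (fun r => r) false).Nodup :=
    (PySem.List.sorted_perm _ _ _).nodup_iff.mpr (PySem.Set.nodup_ofList _)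
  rw [PySem.Dict.items_foldl_insert_fresh _ (fun r => r) _ _
    (fun a _ => PySem.Dict.contains_empty a) (by simpa using hK0_nodup)]
  -- B's loop
  have hruns_keys : ((pvGroupRuns (PySem.List.sorted movies (fun m => m.2) false)).map (fun p => p.1))
      = PySem.Set.ofList ((PySem.List.sorted movies (fun m => m.2) false).map (fun m => m.2)) := by
    rw [hruns]; simp [List.map_map, Function.comp_def]
  have hB := PySem.Dict.items_foldl_insert_fresh (pvGroupRuns (PySem.List.sorted movies (fun m => m.2) false))
    (fun p : Int × List String => p.1) (fun p : Int × List String => p.2) PySem.Dict.empty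
    (fun a _ => PySem.Dict.contains_empty a.1) (by rw [hruns_keys]; exact hKs_nodup)
  simp only at hB
  rw [hB]
  rw [show (PySem.Dict.empty : PySem.Dict Int (List String)).items = [] from rfl, List.nil_append]
  rw [show ((pvGroupRuns (PySem.List.sorted movies (fun m => m.2) false)).map (fun a => (a.1, a.2)))
      = pvGroupRuns (PySem.List.sorted movies (fun m => m.2) false) by simp]
  rw [hruns]
  -- keys equal
  have hperm_s : (PySem.List.sorted movies (fun m => m.2) false).Perm movies :=
    PySem.List.sorted_perm movies (fun m => m.2) false
  have hkeysEq : PySem.List.sorted (PySem.Set.ofList (movies.map (fun m => m.2))) (fun r => r) false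
      = PySem.Set.ofList ((PySem.List.sorted movies (fun m => m.2) false).map (fun m => m.2)) := by
    apply PySem.List.sorted_eq_of_perm_of_pairwise_lt
    · exact (List.perm_ext_iff_of_nodup hKs_nodup (PySem.Set.nodup_ofList _)).mpr
        (fun a => by
          rw [PySem.Set.mem_ofList, PySem.Set.mem_ofList]
          exact (hperm_s.map (fun m => m.2)).mem_iff)
    · have hle : ((PySem.List.sorted movies (fun m => m.2) false).map (fun m => m.2)).Pairwise (· ≤ ·) :=
        List.pairwise_map.mpr hsp
      have hsub := pvOfList_sublist ((PySem.List.sorted movies (fun m => m.2) false).map (fun m => m.2))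
      have hle' := List.Pairwise.sublist hsub hle
      have hne : (PySem.Set.ofList ((PySem.List.sorted movies (fun m => m.2) false).map (fun m => m.2))).Pairwise (· ≠ ·) := hKs_nodup
      exact (hle'.and hne).imp (fun h => lt_of_le_of_ne h.1 h.2)
  rw [hkeysEq]
  apply List.map_congr_left
  intro r hr
  rw [pvGetD]
  congr 1
  exact PySem.List.sorted_eq_sorted_of_perm _ _ (fun x => x) (fun a b h => h)
    (((hperm_s.filter _).map _).symm)

-- ===== VERDICT (by name: the statement is the Claim_ definition above) =====
theorem organize_movies_by_rating_spec : Claim_equal_organize_movies_by_rating := by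
  intro movies _
  show organize_movies_by_rating movies = organize_movies_by_rating_alt movies
  exact pvMain movies
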